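-- pv_equiv track=rewrite | github.com/codinghim/CSE307 | hw1/p3.py | checkEscape
-- ===== SOURCE A (Python) =====
-- def checkEscape(input):
--     startString = ""
--     backslashCounter = 0
--     backslashflag = -2
--     counter = 0
--     for ch in input:
--         if backslashflag == (counter-1):
--             if ch == "\\":
--                 backslashflag = counter
--                 backslashCounter = backslashCounter + 1
--             else:
--                 backslashCounter = 0
--         elif ch == '\\':
--             backslashCounter = 0
--             backslashflag = counter
--             backslashCounter = backslashCounter + 1
--         if(counter == len(input)-1):
--             if (backslashCounter % 2) != 0:
--                 return 1
--             else:
--                 return 0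
--         counter = counter + 1
-- ===== SOURCE B (Python) =====
-- def checkEscape(input):
--     if not input:
--         return None
--     count = 0
--     for ch in reversed(input):
--         if ch == "\\":
--             count += 1
--         else:
--             break
--     return 1 if count % 2 else 0
-- ===== Notes on version B (the rewrite author's own statement) =====
-- stated objective: simpler
-- what changed: B scans the string backwards counting only the trailing backslash run and stopping at the first other character, replacing A's forward pass with flag/position/counter bookkeeping and an in-loop last-index test.
-- outside the precondition, e.g. on checkEscape(''): A returns None, B returns None
import Mathlib
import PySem

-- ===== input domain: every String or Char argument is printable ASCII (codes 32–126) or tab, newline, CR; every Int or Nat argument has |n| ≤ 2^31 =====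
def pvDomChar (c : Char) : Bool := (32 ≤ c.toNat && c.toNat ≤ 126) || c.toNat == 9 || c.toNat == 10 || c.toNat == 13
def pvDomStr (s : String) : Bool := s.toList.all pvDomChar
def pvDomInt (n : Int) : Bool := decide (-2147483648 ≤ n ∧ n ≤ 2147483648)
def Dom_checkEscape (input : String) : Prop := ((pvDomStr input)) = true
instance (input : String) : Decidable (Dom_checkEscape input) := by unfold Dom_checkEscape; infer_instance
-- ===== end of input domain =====

-- B counts the trailing backslash run from the end instead of A's forward scan with
-- flag/position bookkeeping; simpler, same return value on every non-empty input.

-- ===== PORT A =====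
-- state: backslashCounter, backslashflag, counter, n = len(input); none = fell off the loop
def ceLoop : List Char → Int → Int → Int → Int → Option Int
  | [], _, _, _, _ => none
  | ch :: rest, bc, bf, counter, n =>
    let s :=
      if bf = counter - 1 then
        (if ch = '\\' then (bc + 1, counter) else ((0 : Int), bf))
      else if ch = '\\' then ((1 : Int), counter)
      else (bc, bf)
    if counter = n - 1 then some (if s.1 % 2 ≠ 0 then 1 else 0)
    else ceLoop rest s.1 s.2 (counter + 1) n

def checkEscape (input : String) : Int :=
  (ceLoop input.toList 0 (-2) 0 (input.toList.length : Int)).getD 0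

-- ===== PORT B =====
-- count consecutive backslashes from the reversed string, stopping at the first other char
def trailBS : List Char → Int → Int
  | [], c => c
  | ch :: rest, c => if ch = '\\' then trailBS rest (c + 1) else c

def checkEscape_alt (input : String) : Int :=
  if input.toList = [] then 0
  else if trailBS input.toList.reverse 0 % 2 ≠ 0 then 1 else 0

-- ===== PRECONDITION & SPEC =====
-- Pre_ excludes the empty string, on which A (and B) return Python None, not an int.
def Pre_checkEscape (input : String) : Prop := input ≠ ""
instance (input : String) : Decidable (Pre_checkEscape input) := by unfold Pre_checkEscape; infer_instance
def pvWitness_checkEscape : String := "a\\"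

def Spec_checkEscape (input : String) (out : Int) : Prop := out = checkEscape_alt input
instance (input : String) (out : Int) : Decidable (Spec_checkEscape input out) := by unfold Spec_checkEscape; infer_instance

-- ===== CLAIM =====
def Claim_equal_checkEscape : Prop := ∀ (input : String), Dom_checkEscape input → Pre_checkEscape input → Spec_checkEscape input (checkEscape input)

-- ===== LEMMAS AND PROOFS =====

-- leading-backslash run count of a list (applied to the reversed string = trailing run)
def runRev : List Char → Int
  | [] => 0
  | c :: t => if c = '\\' then runRev t + 1 else 0

lemma runRev_nonneg (l : List Char) : 0 ≤ runRev l := by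
  induction l with
  | nil => simp [runRev]
  | cons c t ih => simp only [runRev]; split <;> omega

lemma trailBS_eq (l : List Char) (c : Int) : trailBS l c = c + runRev l := by
  induction l generalizing c with
  | nil => simp [trailBS, runRev]
  | cons x t ih =>
    simp only [trailBS, runRev]
    split
    · rw [ih]; ring
    · ring

lemma ceLoop_cons (ch : Char) (rest : List Char) (bc bf counter n : Int) :
    ceLoop (ch :: rest) bc bf counter n =
      if counter = n - 1 then
        some (if (if bf = counter - 1 then (if ch = '\\' then (bc + 1, counter) else ((0:Int), bf)) else if ch = '\\' then ((1:Int), counter) else (bc, bf)).1 % 2 ≠ 0 then 1 else 0)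
      else
        ceLoop rest (if bf = counter - 1 then (if ch = '\\' then (bc + 1, counter) else ((0:Int), bf)) else if ch = '\\' then ((1:Int), counter) else (bc, bf)).1 (if bf = counter - 1 then (if ch = '\\' then (bc + 1, counter) else ((0:Int), bf)) else if ch = '\\' then ((1:Int), counter) else (bc, bf)).2 (counter + 1) n := rfl

lemma ceLoop_eq (rest : List Char) (pre : List Char) (bf : Int) (hne : rest ≠ [])
    (hlt : bf < (pre.length : Int))
    (hiff : bf = (pre.length : Int) - 1 ↔ runRev pre.reverse ≠ 0) :
    ceLoop rest (runRev pre.reverse) bf (pre.length : Int) ((pre.length : Int) + (rest.length : Int))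
      = some (if runRev (pre ++ rest).reverse % 2 ≠ 0 then 1 else 0) := by
  induction rest generalizing pre bf with
  | nil => exact absurd rfl hne
  | cons c rest' ih =>
    have hnn := runRev_nonneg pre.reverse
    have hnew : runRev (pre ++ [c]).reverse
        = if c = '\\' then runRev pre.reverse + 1 else 0 := by
      simp [List.reverse_append, runRev]
    cases rest' with
    | nil =>
      simp only [ceLoop]
      rw [if_pos (by simp)]
      congr 1
      by_cases hbf : bf = (pre.length : Int) - 1 <;> by_cases hcb : c = '\\' <;>
        [skip; skip;
         (have h0 : runRev pre.reverse = 0 := by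
            by_contra h; exact hbf (hiff.mpr h));
         (have h0 : runRev pre.reverse = 0 := by
            by_contra h; exact hbf (hiff.mpr h))] <;>
        simp_all [List.reverse_append, runRev]
    | cons d rest'' =>
      rw [ceLoop_cons,
        if_neg (show ¬((pre.length : Int) = (pre.length : Int) + ((c :: d :: rest'').length : Int) - 1) by simp only [List.length_cons]; push_cast; omega)]
      have hlen' : ((pre ++ [c]).length : Int) = (pre.length : Int) + 1 := by
        simp
      have hn : ((pre ++ [c]).length : Int) + ((d :: rest'').length : Int)
          = (pre.length : Int) + ((c :: d :: rest'').length : Int) := by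
        simp; ring
      have hassoc : (pre ++ [c]) ++ (d :: rest'') = pre ++ (c :: d :: rest'') := by simp
      by_cases hbf : bf = (pre.length : Int) - 1 <;> by_cases hcb : c = '\\'
      · -- prev BS, cur BS
        have hiff' : (pre.length : Int) = ((pre ++ [c]).length : Int) - 1
            ↔ runRev (pre ++ [c]).reverse ≠ 0 := by
          rw [hlen', hnew, if_pos hcb]; constructor <;> intro <;> omega
        have IH := ih (pre ++ [c]) (pre.length : Int)
          (by simp) (by rw [hlen']; omega) hiff'
        rw [hn, hassoc, hlen'] at IH
        rw [hnew, if_pos hcb] at IH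
        simpa [hbf, hcb] using IH
      · -- prev BS, cur not BS
        have hiff' : bf = ((pre ++ [c]).length : Int) - 1
            ↔ runRev (pre ++ [c]).reverse ≠ 0 := by
          rw [hlen', hnew, if_neg hcb]
          constructor
          · intro h; omega
          · intro h; omega
        have IH := ih (pre ++ [c]) bf
          (by simp) (by rw [hlen']; omega) hiff'
        rw [hn, hassoc, hlen'] at IH
        rw [hnew, if_neg hcb] at IH
        simpa [hbf, hcb] using IH
      · -- prev not BS, cur BS
        have h0 : runRev pre.reverse = 0 := by
          by_contra h; exact hbf (hiff.mpr h)
        have hiff' : (pre.length : Int) = ((pre ++ [c]).length : Int) - 1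
            ↔ runRev (pre ++ [c]).reverse ≠ 0 := by
          rw [hlen', hnew, if_pos hcb]; constructor <;> intro <;> omega
        have IH := ih (pre ++ [c]) (pre.length : Int)
          (by simp) (by rw [hlen']; omega) hiff'
        rw [hn, hassoc, hlen'] at IH
        rw [hnew, if_pos hcb, h0] at IH
        simpa [hbf, hcb] using IH
      · -- prev not BS, cur not BS
        have h0 : runRev pre.reverse = 0 := by
          by_contra h; exact hbf (hiff.mpr h)
        have hiff' : bf = ((pre ++ [c]).length : Int) - 1
            ↔ runRev (pre ++ [c]).reverse ≠ 0 := by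
          rw [hlen', hnew, if_neg hcb]
          constructor
          · intro h; omega
          · intro h; omega
        have IH := ih (pre ++ [c]) bf
          (by simp) (by rw [hlen']; omega) hiff'
        rw [hn, hassoc, hlen'] at IH
        rw [hnew, if_neg hcb] at IH
        rw [h0]
        simpa [hbf, hcb] using IH

-- ===== VERDICT =====
theorem checkEscape_spec : Claim_equal_checkEscape := by
  intro input _ hpre
  unfold Spec_checkEscape checkEscape checkEscape_alt
  have hne : input.toList ≠ [] := by
    intro h
    apply hpre
    have h2 := congrArg String.ofList h
    simpa using h2
  have h := ceLoop_eq input.toList [] (-2) hne (by simp) (by simp [runRev])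
  have h0 : runRev ([] : List Char).reverse = 0 := rfl
  rw [h0] at h
  simp only [List.length_nil, Nat.cast_zero, zero_add, List.nil_append] at h
  rw [h, if_neg hne, trailBS_eq]
  simp
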